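-- pv_equiv track=rewrite | github.com/shaumikkhanna/IITM | Sem2/Programming_in_python/week8/Graded-5.py | trending
-- ===== SOURCE A (Python) =====
-- def trending(subject_topics):
-- 	all_subjects = []
-- 	for subject in subject_topics:
-- 		all_subjects += subject
--
-- 	occurances = dict()
-- 	for subject in all_subjects:
-- 		try:
-- 			occurances[subject] += 1
-- 		except KeyError:
-- 			occurances[subject] = 1
--
-- 	min_ = min(occurances.values())
-- 	max_ = max(occurances.values())
--
-- 	min_count = sum(freq == min_ for freq in occurances.values())
-- 	max_count = sum(freq == max_ for freq in occurances.values())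
--
-- 	return max_count, min_count
-- ===== SOURCE B (Python) =====
-- def trending(subject_topics):
--     occ = {}
--     for subject in subject_topics:
--         for topic in subject:
--             occ[topic] = occ.get(topic, 0) + 1
--     it = iter(occ.values())
--     mx = mn = next(it)
--     mxc = mnc = 1
--     for v in it:
--         if v > mx:
--             mx, mxc = v, 1
--         elif v == mx:
--             mxc += 1
--         if v < mn:
--             mn, mnc = v, 1
--         elif v == mn:
--             mnc += 1
--     return mxc, mnc
-- ===== Notes on version B (the rewrite author's own statement) =====
-- stated objective: alternative
-- what changed: Replaces A's four separate scans over the frequency values (min, max, and two equality-count sums) by a single pass that maintains the running max/min together with their multiplicities; the dict is built in one nested loop with .get instead of flattening first and using try/except.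
import Mathlib
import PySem

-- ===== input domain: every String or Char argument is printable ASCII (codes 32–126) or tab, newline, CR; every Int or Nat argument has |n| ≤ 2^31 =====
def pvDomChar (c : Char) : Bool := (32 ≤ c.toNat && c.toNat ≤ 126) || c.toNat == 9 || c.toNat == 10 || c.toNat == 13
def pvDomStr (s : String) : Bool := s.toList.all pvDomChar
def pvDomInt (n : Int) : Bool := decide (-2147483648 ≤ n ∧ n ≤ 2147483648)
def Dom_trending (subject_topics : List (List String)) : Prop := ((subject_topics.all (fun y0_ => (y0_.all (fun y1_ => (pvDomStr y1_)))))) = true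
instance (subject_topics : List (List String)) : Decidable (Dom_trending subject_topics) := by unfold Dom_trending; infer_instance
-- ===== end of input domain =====

-- B replaces A's four separate value-scans (min, max, two equality-count sums) by one pass that
-- maintains the running max/min with their multiplicities; objective: alternative (same cost class).

-- ===== PORT A =====
def trending (subject_topics : List (List String)) : Int × Int :=
  let all_subjects := subject_topics.foldl (fun acc subject => acc ++ subject) []
  let occurances := all_subjects.foldl
    (fun d subject =>
      match d.get? subject with          -- try: occurances[subject] += 1 / except KeyError: = 1
      | some v => d.insert subject (v + 1)
      | none   => d.insert subject 1)
    (PySem.Dict.empty : PySem.Dict String Int)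
  -- min/max raise ValueError on an empty dict: none there, excluded by Pre_; .getD 0 is never used inside Pre_
  let min_ := (PySem.List.min? occurances.values (fun x => x)).getD 0
  let max_ := (PySem.List.max? occurances.values (fun x => x)).getD 0
  let min_count := (occurances.values.map (fun freq => if freq == min_ then (1 : Int) else 0)).sum
  let max_count := (occurances.values.map (fun freq => if freq == max_ then (1 : Int) else 0)).sum
  (max_count, min_count)

-- ===== PORT B =====
-- the single-pass loop body: update (mx, mxc, mn, mnc) with the next value v
def trendingStep (st : Int × Int × Int × Int) (v : Int) : Int × Int × Int × Int :=
  let (mx, mxc, mn, mnc) := st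
  let (mx, mxc) := if v > mx then (v, 1) else if v == mx then (mx, mxc + 1) else (mx, mxc)
  let (mn, mnc) := if v < mn then (v, 1) else if v == mn then (mn, mnc + 1) else (mn, mnc)
  (mx, mxc, mn, mnc)

def trending_alt (subject_topics : List (List String)) : Int × Int :=
  let occ := subject_topics.foldl
    (fun d subject => subject.foldl (fun d topic => d.insert topic (d.getD topic 0 + 1)) d)
    (PySem.Dict.empty : PySem.Dict String Int)
  match occ.values with
  | [] => (0, 0)              -- Source B raises StopIteration here; outside Pre_
  | v :: rest =>
    let st := rest.foldl trendingStep (v, 1, v, 1)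
    (st.2.1, st.2.2.2)

-- ===== PRECONDITION & SPEC =====
-- Pre_ excludes exactly the inputs with no topics at all: there A raises ValueError (min of an
-- empty sequence) and B raises StopIteration (next on an empty iterator).
def Pre_trending (subject_topics : List (List String)) : Prop := subject_topics.flatten ≠ []
instance (subject_topics : List (List String)) : Decidable (Pre_trending subject_topics) := by unfold Pre_trending; infer_instance

def pvWitness_trending : List (List String) := [["math", "cs"], ["cs"]]

def Spec_trending (subject_topics : List (List String)) (out : Int × Int) : Prop := out = trending_alt subject_topics
instance (subject_topics : List (List String)) (out : Int × Int) : Decidable (Spec_trending subject_topics out) := by unfold Spec_trending; infer_instance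

-- ===== CLAIM (what is proved, stated in full; the proofs are below) =====
def Claim_equal_trending : Prop := ∀ (subject_topics : List (List String)), Dom_trending subject_topics → Pre_trending subject_topics → Spec_trending subject_topics (trending subject_topics)

-- ===== LEMMAS AND PROOFS =====

-- A's try/except update is the getD-based update
theorem trending_dictA_eq (all : List String) :
    all.foldl
      (fun d subject =>
        match d.get? subject with
        | some v => d.insert subject (v + 1)
        | none   => d.insert subject 1)
      (PySem.Dict.empty : PySem.Dict String Int)
    = PySem.Dict.counter all := by
  rw [← PySem.Dict.foldl_insert_getD_add_one_eq_counter]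
  apply PySem.List.foldl_congr_mem
  intro d s _
  rw [PySem.Dict.getD_eq_get?_getD]
  cases h : d.get? s <;> simp

-- B's nested loop builds the same counter over the flattened list
theorem trending_dictB_eq (st : List (List String)) :
    st.foldl
      (fun d subject => subject.foldl (fun d topic => d.insert topic (d.getD topic 0 + 1)) d)
      (PySem.Dict.empty : PySem.Dict String Int)
    = PySem.Dict.counter st.flatten := by
  rw [← PySem.Dict.foldl_insert_getD_add_one_eq_counter, ← List.foldl_flatten]

-- loop invariant for B's single pass: after consuming `seen`, the state holds the max of `seen`,
-- its multiplicity, the min of `seen`, and its multiplicity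
def GoodState (seen : List Int) (st : Int × Int × Int × Int) : Prop :=
  st.1 ∈ seen ∧ (∀ y ∈ seen, y ≤ st.1) ∧ st.2.1 = (seen.count st.1 : Int) ∧
  st.2.2.1 ∈ seen ∧ (∀ y ∈ seen, st.2.2.1 ≤ y) ∧ st.2.2.2 = (seen.count st.2.2.1 : Int)

theorem goodState_step (seen : List Int) (st : Int × Int × Int × Int) (v : Int)
    (h : GoodState seen st) : GoodState (seen ++ [v]) (trendingStep st v) := by
  obtain ⟨mx, mxc, mn, mnc⟩ := st
  obtain ⟨hmem, hle, hcnt, hmem', hge, hcnt'⟩ := h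
  have hcm : ∀ x : Int, ((seen ++ [v]).count x : Int) = (seen.count x : Int) + if v = x then 1 else 0 := by
    intro x; by_cases hvx : v = x <;> simp [List.count_append, hvx]
  simp only [trendingStep, GoodState]
  split_ifs
  all_goals simp only [beq_iff_eq] at *
  all_goals refine ⟨?_, ?_, ?_, ?_, ?_, ?_⟩
  all_goals simp only [List.mem_append, List.mem_singleton, hcm]
  all_goals try tauto
  all_goals try
    (intro y hy
     rcases hy with hy | hy
     · first
         | (have := hle y hy; omega)
         | (have := hge y hy; omega)
     · omega)
  all_goals try (split_ifs <;> (try omega) <;> simp_all)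
  all_goals rw [List.count_eq_zero]
  all_goals intro hv
  all_goals (try have h10 := hle _ hv)
  all_goals (try have h11 := hge _ hv)
  all_goals omega

theorem goodState_foldl (l : List Int) (seen : List Int) (st : Int × Int × Int × Int)
    (h : GoodState seen st) : GoodState (seen ++ l) (l.foldl trendingStep st) := by
  induction l generalizing seen st with
  | nil => simpa using h
  | cons v t ih =>
    have := ih (seen ++ [v]) (trendingStep st v) (goodState_step seen st v h)
    simpa using this

theorem goodState_full (v : Int) (rest : List Int) :
    GoodState (v :: rest) (rest.foldl trendingStep (v, 1, v, 1)) := by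
  have h0 : GoodState [v] ((v, 1, v, 1) : Int × Int × Int × Int) := by
    refine ⟨by simp, by simp, by simp, by simp, by simp, by simp⟩
  simpa using goodState_foldl rest [v] (v, 1, v, 1) h0

-- A's 0/1-sum is a count
theorem sum_ite_eq_count (l : List Int) (a : Int) :
    (l.map (fun f => if f == a then (1 : Int) else 0)).sum = (l.count a : Int) := by
  rw [PySem.List.sum_map_ite_one_zero]
  simp [List.count]

-- ===== VERDICT (by name: the statement is the Claim_ definition above) =====
theorem trending_spec : Claim_equal_trending := by
  intro st _ hpre
  unfold Spec_trending trending trending_alt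
  rw [PySem.List.foldl_append_eq_flatten]
  simp only [List.nil_append]
  simp only [trending_dictA_eq, trending_dictB_eq]
  set vals := (PySem.Dict.counter st.flatten (κ := String)).values with hvals
  cases hv : vals with
  | nil =>
    exfalso
    have hkeys : (PySem.Dict.counter (κ := String) st.flatten).keys = [] := by
      have h2 : vals = [] := hv
      rw [hvals] at h2
      simp only [PySem.Dict.values, List.map_eq_nil_iff] at h2
      simp [PySem.Dict.keys, h2]
    rw [PySem.Dict.keys_counter] at hkeys
    rcases List.exists_mem_of_ne_nil _ hpre with ⟨x, hx⟩
    have hmemx : x ∈ PySem.Set.ofList st.flatten := by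
      rw [PySem.Set.mem_ofList]; exact hx
    rw [hkeys] at hmemx
    simp at hmemx
  | cons v rest =>
    have hgood := goodState_full v rest
    obtain ⟨hmem, hle, hcnt, hmem', hge, hcnt'⟩ := hgood
    set fin := rest.foldl trendingStep (v, 1, v, 1) with hfin
    have hmax : PySem.List.max? vals (fun x => x) = some (rest.foldl max v) := by
      rw [hv]; exact PySem.List.max?_id_cons v rest
    have hmin : PySem.List.min? vals (fun x => x) = some (rest.foldl min v) := by
      rw [hv]; exact PySem.List.min?_id_cons v rest
    have hMmem : rest.foldl max v ∈ v :: rest := by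
      rcases PySem.List.foldl_max_mem rest v with h | h
      · rw [h]; exact List.mem_cons_self
      · exact List.mem_cons_of_mem _ h
    have hMle : ∀ y ∈ v :: rest, y ≤ rest.foldl max v := by
      intro y hy; rw [List.mem_cons] at hy
      rcases hy with rfl | hy
      · exact (PySem.List.le_foldl_max rest y).1
      · exact (PySem.List.le_foldl_max rest v).2 y hy
    have hmmem : rest.foldl min v ∈ v :: rest := by
      rcases PySem.List.foldl_min_mem rest v with h | h
      · rw [h]; exact List.mem_cons_self
      · exact List.mem_cons_of_mem _ h
    have hmle : ∀ y ∈ v :: rest, rest.foldl min v ≤ y := by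
      intro y hy; rw [List.mem_cons] at hy
      rcases hy with rfl | hy
      · exact (PySem.List.foldl_min_le rest y).1
      · exact (PySem.List.foldl_min_le rest v).2 y hy
    have heqM : rest.foldl max v = fin.1 := by
      have h1 : rest.foldl max v ≤ fin.1 := hle _ hMmem
      have h2 : fin.1 ≤ rest.foldl max v := hMle _ hmem
      omega
    have heqm : rest.foldl min v = fin.2.2.1 := by
      have h1 : fin.2.2.1 ≤ rest.foldl min v := hge _ hmmem
      have h2 : rest.foldl min v ≤ fin.2.2.1 := hmle _ hmem'
      omega
    rw [hv] at hmax hmin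
    simp only [hmax, hmin, Option.getD_some, sum_ite_eq_count, heqM, heqm]
    rw [hcnt, hcnt']
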